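-- pv_equiv track=rewrite | github.com/GamesCrafters/GamesmanIndie | curses/ui_default.py | position_string
-- ===== SOURCE A (Python) =====
-- offset = (0, 0)
--
-- def position_string(pos):
--     args = pos.split('_')
--     type = args[0]
--
--     if type == 'R':
--         _, player, rows, cols, board = args[:5]
--         rows, cols = int(rows), int(cols)
--         board = board.replace('-', ' ')
--
--         board_str = '┌' + '───┬' * (cols - 1) + '───┐\n'
--         for r in range(rows):
--             board_str += '│'
--             for c in range(cols):
--                 board_str += ' ' + board[r * cols + c] + ' ' + '│'
--             if r < rows - 1:
--                 board_str += '\n├' + '───┼' * (cols - 1) + '───┤\n'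
--             else:
--                 board_str += '\n└' + '───┴' * (cols - 1) + '───┘\n'
--
--         return board_str, offset
--     else:
--         return pos, offset
-- ===== SOURCE B (Python) =====
-- offset = (0, 0)
--
-- def position_string(pos):
--     args = pos.split('_')
--     if args[0] != 'R':
--         return pos, offset
--
--     _, player, rows, cols, board = args[:5]
--     rows, cols = int(rows), int(cols)
--     board = board.replace('-', ' ')
--
--     # Generate each character of the grid directly from its (line, column)
--     # coordinates: the grid has 2*rows+1 lines of 4*cols+1 characters each.
--     def glyph(i, j):
--         if i % 2 == 0:  # border line
--             if j == 0:
--                 return '┌' if i == 0 else ('└' if i == 2 * rows else '├')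
--             if j == 4 * cols:
--                 return '┐' if i == 0 else ('┘' if i == 2 * rows else '┤')
--             if j % 4 == 0:
--                 return '┬' if i == 0 else ('┴' if i == 2 * rows else '┼')
--             return '─'
--         else:  # cell line for board row (i-1)//2
--             if j % 4 == 0:
--                 return '│'
--             if j % 4 == 2:
--                 return board[(i - 1) // 2 * cols + j // 4]
--             return ' '
--
--     lines = (''.join(glyph(i, j) for j in range(4 * cols + 1))
--              for i in range(2 * rows + 1))
--     return '\n'.join(lines) + '\n', offset
-- ===== Notes on version B (the rewrite author's own statement) =====
-- stated objective: alternative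
-- what changed: B computes each output character directly from its (line, column) coordinates with a closed-form glyph function over a 2*rows+1 by 4*cols+1 grid and joins the generated lines, instead of A's sequential accumulation of borders and cell chunks with += and a per-row last-row branch.
-- outside the precondition, e.g. on position_string('R_1_1_0_x'): A returns ('┌───┐\n│\n└───┘\n', (0, 0)), B returns ('┌\n│\n└\n', (0, 0)); on position_string('R_1_-1_2_ab'): A returns ('┌───┬───┐\n', (0, 0)), B returns ('\n', (0, 0))
import Mathlib
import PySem

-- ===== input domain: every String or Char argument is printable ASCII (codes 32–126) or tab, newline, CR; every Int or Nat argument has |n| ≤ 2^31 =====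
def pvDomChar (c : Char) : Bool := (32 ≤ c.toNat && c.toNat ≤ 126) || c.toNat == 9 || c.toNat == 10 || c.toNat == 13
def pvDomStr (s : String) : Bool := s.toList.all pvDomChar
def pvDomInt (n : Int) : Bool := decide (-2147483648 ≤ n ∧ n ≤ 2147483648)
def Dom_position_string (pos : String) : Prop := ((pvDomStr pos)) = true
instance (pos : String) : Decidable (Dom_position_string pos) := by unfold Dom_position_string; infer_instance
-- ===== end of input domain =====

-- B generates each character of the grid directly from its (line, column) coordinates
-- with a closed-form glyph function, instead of A's sequential border/cell accumulation
-- (objective: alternative algorithm, same cost).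

-- ===== PORT A =====
-- Python string repetition s * n (negative n gives ''): exact, hand-ported.
def pvRepeatA (xs : List Char) (n : Int) : List Char :=
  (List.replicate n.toNat xs).flatten

def position_string (pos : String) : String × (Int × Int) :=
  let args := PySem.Chars.splitOn pos.toList ['_']
  let type := args.getD 0 []
  if type = ['R'] then
    if 5 ≤ args.length then
      match PySem.Int.ofChars? (args.getD 2 []), PySem.Int.ofChars? (args.getD 3 []) with
      | some rows, some cols =>
        let board := PySem.Chars.replace (args.getD 4 []) ['-'] [' ']
        let board_str := '┌' :: (pvRepeatA ['─','─','─','┬'] (cols - 1) ++ ['─','─','─','┐','\n'])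
        let board_str := (PySem.List.pyRange 0 rows 1).foldl (fun acc r =>
          let acc := acc ++ ['│']
          let acc := (PySem.List.pyRange 0 cols 1).foldl (fun acc c =>
            acc ++ (' ' :: PySem.List.pyGetD board (r * cols + c) ' ' :: [' ','│'])) acc
          if r < rows - 1 then
            acc ++ ('\n' :: '├' :: (pvRepeatA ['─','─','─','┼'] (cols - 1) ++ ['─','─','─','┤','\n']))
          else
            acc ++ ('\n' :: '└' :: (pvRepeatA ['─','─','─','┴'] (cols - 1) ++ ['─','─','─','┘','\n']))) board_str
        (String.ofList board_str, (0, 0))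
      | _, _ => ("", (0, 0))   -- unreachable under Pre_ (Python's int() raises ValueError)
    else ("", (0, 0))          -- unreachable under Pre_ (unpacking args[:5] raises ValueError)
  else (pos, (0, 0))

-- ===== PORT B =====
-- glyph(i, j) of Source B: the character of the grid at line i, column j.
def pvGlyph (rows cols : Int) (board : List Char) (i j : Int) : Char :=
  if PySem.Int.mod i 2 = 0 then
    if j = 0 then (if i = 0 then '┌' else if i = 2 * rows then '└' else '├')
    else if j = 4 * cols then (if i = 0 then '┐' else if i = 2 * rows then '┘' else '┤')
    else if PySem.Int.mod j 4 = 0 then (if i = 0 then '┬' else if i = 2 * rows then '┴' else '┼')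
    else '─'
  else
    if PySem.Int.mod j 4 = 0 then '│'
    else if PySem.Int.mod j 4 = 2 then
      -- board[(i-1)//2 * cols + j//4]: in range on every index Source B reaches under Pre_
      PySem.List.pyGetD board (PySem.Int.floordiv (i - 1) 2 * cols + PySem.Int.floordiv j 4) ' '
    else ' '

def position_string_alt (pos : String) : String × (Int × Int) :=
  let args := PySem.Chars.splitOn pos.toList ['_']
  if args.getD 0 [] ≠ ['R'] then (pos, (0, 0))
  else if 5 ≤ args.length then
    match PySem.Int.ofChars? (args.getD 2 []) with
    | none => ("", (0, 0))     -- unreachable under Pre_ (Python's int() raises ValueError)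
    | some rows =>
      match PySem.Int.ofChars? (args.getD 3 []) with
      | none => ("", (0, 0))   -- unreachable under Pre_ (Python's int() raises ValueError)
      | some cols =>
        let board := PySem.Chars.replace (args.getD 4 []) ['-'] [' ']
        let lines := (PySem.List.pyRange 0 (2 * rows + 1) 1).map (fun i =>
          (PySem.List.pyRange 0 (4 * cols + 1) 1).map (pvGlyph rows cols board i))
        (String.ofList (PySem.Chars.join ['\n'] lines ++ ['\n']), (0, 0))
  else ("", (0, 0))            -- unreachable under Pre_ (unpacking args[:5] raises ValueError)

-- ===== PRECONDITION & SPEC =====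
-- Pre_ excludes the inputs where Python A raises (fewer than 5 '_'-fields, non-integer
-- rows/cols, board shorter than rows*cols), and also R-positions with rows < 0 or
-- cols ≤ 0: degenerate no-column/negative-row grids on which A's negative string
-- repetition yields an accidental 3-dash border that no grid renderer would specify
-- and B's coordinate formula has no reason to reproduce.
def Pre_position_string (pos : String) : Prop :=
  let args := PySem.Chars.splitOn pos.toList ['_']
  args.getD 0 [] = ['R'] →
    5 ≤ args.length ∧
    (PySem.Int.ofChars? (args.getD 2 [])).isSome = true ∧
    (PySem.Int.ofChars? (args.getD 3 [])).isSome = true ∧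
    0 ≤ (PySem.Int.ofChars? (args.getD 2 [])).getD 0 ∧
    1 ≤ (PySem.Int.ofChars? (args.getD 3 [])).getD 0 ∧
    (PySem.Int.ofChars? (args.getD 2 [])).getD 0 * (PySem.Int.ofChars? (args.getD 3 [])).getD 0
      ≤ ((args.getD 4 []).length : Int)
instance (pos : String) : Decidable (Pre_position_string pos) := by unfold Pre_position_string; infer_instance

def pvWitness_position_string : String := "R_1_2_2_ab-d"

def Spec_position_string (pos : String) (out : String × (Int × Int)) : Prop := out = position_string_alt pos
instance (pos : String) (out : String × (Int × Int)) : Decidable (Spec_position_string pos out) := by unfold Spec_position_string; infer_instance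

-- ===== CLAIM (what is proved, stated in full; the proofs are below) =====
def Claim_equal_position_string : Prop := ∀ (pos : String), Dom_position_string pos → Pre_position_string pos → Spec_position_string pos (position_string pos)

-- ===== LEMMAS AND PROOFS =====

-- shaping: pull the common head of an if's two branches outside
lemma pv_ite_append (p : Prop) [Decidable p] (u v w : List Char) :
    (if p then u ++ v else u ++ w) = u ++ (if p then v else w) := by split <;> rfl

lemma pv_ite_cons (p : Prop) [Decidable p] (x : Char) (l l' : List Char) :
    (if p then x :: l else x :: l') = x :: (if p then l else l') := by split <;> rfl

lemma pv_ite_append_right (p : Prop) [Decidable p] (u v w : List Char) :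
    (if p then v ++ u else w ++ u) = (if p then v else w) ++ u := by split <;> rfl

-- a '\n'-join of a nonempty line list followed by a final '\n' terminates EVERY line
lemma pv_join_newline : ∀ (ls : List (List Char)) (x : List Char),
    PySem.Chars.join ['\n'] (x :: ls) ++ ['\n'] = (x :: ls).flatMap (fun l => l ++ ['\n']) := by
  intro ls
  induction ls with
  | nil => intro x; simp [PySem.Chars.join_singleton]
  | cons y t ih => intro x; rw [PySem.Chars.join_cons_cons]; simp [ih y]

-- B's even border lines, closed form = A's repeated-block border
lemma pv_border_line (cols : Int) (l m r : Char) :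
    ∀ (c : Nat), 1 ≤ c → (c : Int) ≤ cols →
    (PySem.List.pyRange 0 (4 * (c : Int) + 1) 1).map
        (fun j => if j = 0 then l else if j = 4 * cols then r else if j % 4 = 0 then m else '─')
      = l :: ((List.replicate (c - 1) ['─','─','─',m]).flatten
          ++ ['─','─','─', if (c : Int) = cols then r else m]) := by
  intro c
  induction c with
  | zero => intro h; omega
  | succ c ih =>
    intro _ hle
    by_cases hc : c = 0
    · subst hc
      have h5 : PySem.List.pyRange 0 (4 * ((1 : Nat) : Int) + 1) 1 = [0, 1, 2, 3, 4] := by decide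
      rw [h5]
      simp only [List.map_cons, List.map_nil]
      push_cast at hle ⊢
      rw [if_neg (show ¬((1 : Int) = 4 * cols) by omega),
          if_neg (show ¬((2 : Int) = 4 * cols) by omega),
          if_neg (show ¬((3 : Int) = 4 * cols) by omega)]
      by_cases h1 : (4 : Int) = 4 * cols
      · rw [if_pos h1, if_pos (show (1 : Int) = cols by omega)]
        simp
      · rw [if_neg h1, if_neg (show ¬((1 : Int) = cols) by omega)]
        simp
    · have hc1 : 1 ≤ c := by omega
      have hle' : (c : Int) ≤ cols := by push_cast at hle ⊢; omega
      have ihv := ih hc1 hle'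
      have hsplit : PySem.List.pyRange 0 (4 * ((c + 1 : Nat) : Int) + 1) 1
          = PySem.List.pyRange 0 (4 * (c : Int) + 1) 1
            ++ PySem.List.pyRange (4 * (c : Int) + 1) (4 * ((c + 1 : Nat) : Int) + 1) 1 := by
        apply PySem.List.pyRange_one_append <;> push_cast <;> omega
      have htail : PySem.List.pyRange (4 * (c : Int) + 1) (4 * ((c + 1 : Nat) : Int) + 1) 1
          = [4 * (c : Int) + 1, 4 * (c : Int) + 2, 4 * (c : Int) + 3, 4 * (c : Int) + 4] := by
        push_cast
        rw [PySem.List.pyRange_one_cons (by omega), PySem.List.pyRange_one_cons (by omega),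
            PySem.List.pyRange_one_cons (by omega), PySem.List.pyRange_one_cons (by omega),
            PySem.List.pyRange_one_eq_nil (by omega)]
        simp only [List.cons.injEq, and_true]
        exact ⟨trivial, by omega, by omega, by omega⟩
      rw [hsplit, htail, List.map_append, ihv]
      have hcne : ¬ ((c : Int) = cols) := by push_cast at hle; omega
      rw [if_neg hcne]
      simp only [List.map_cons, List.map_nil]
      rw [if_neg (show ¬(4 * (c : Int) + 1 = 0) by omega),
          if_neg (show ¬(4 * (c : Int) + 1 = 4 * cols) by omega),
          if_neg (show ¬((4 * (c : Int) + 1) % 4 = 0) by omega),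
          if_neg (show ¬(4 * (c : Int) + 2 = 0) by omega),
          if_neg (show ¬(4 * (c : Int) + 2 = 4 * cols) by omega),
          if_neg (show ¬((4 * (c : Int) + 2) % 4 = 0) by omega),
          if_neg (show ¬(4 * (c : Int) + 3 = 0) by omega),
          if_neg (show ¬(4 * (c : Int) + 3 = 4 * cols) by omega),
          if_neg (show ¬((4 * (c : Int) + 3) % 4 = 0) by omega),
          if_neg (show ¬(4 * (c : Int) + 4 = 0) by omega)]
      by_cases h4 : 4 * (c : Int) + 4 = 4 * cols
      · rw [if_pos h4, if_pos (by push_cast; omega : ((c + 1 : Nat) : Int) = cols)]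
        have : (c + 1 - 1 : Nat) = (c - 1) + 1 := by omega
        rw [this, List.replicate_succ']
        simp
      · rw [if_neg h4, if_neg (by push_cast at hle ⊢; omega : ¬ ((c + 1 : Nat) : Int) = cols),
            if_pos (by omega : (4 * (c : Int) + 4) % 4 = 0)]
        have : (c + 1 - 1 : Nat) = (c - 1) + 1 := by omega
        rw [this, List.replicate_succ']
        simp

-- B's odd cell lines, closed form = A's per-cell chunks
lemma pv_data_line (board : List Char) (base : Int) :
    ∀ (c : Nat),
    (PySem.List.pyRange 0 (4 * (c : Int) + 1) 1).map
        (fun j => if j % 4 = 0 then '│'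
                  else if j % 4 = 2 then PySem.List.pyGetD board (base + j / 4) ' '
                  else ' ')
      = '│' :: ((PySem.List.pyRange 0 (c : Int) 1).map
          (fun cc => [' ', PySem.List.pyGetD board (base + cc) ' ', ' ', '│'])).flatten := by
  intro c
  induction c with
  | zero =>
    have h1 : PySem.List.pyRange 0 (4 * ((0 : Nat) : Int) + 1) 1 = [0] := by decide
    rw [h1]
    simp [PySem.List.pyRange_one_eq_nil]
  | succ c ih =>
    have hsplit : PySem.List.pyRange 0 (4 * ((c + 1 : Nat) : Int) + 1) 1
        = PySem.List.pyRange 0 (4 * (c : Int) + 1) 1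
          ++ PySem.List.pyRange (4 * (c : Int) + 1) (4 * ((c + 1 : Nat) : Int) + 1) 1 := by
      apply PySem.List.pyRange_one_append <;> push_cast <;> omega
    have htail : PySem.List.pyRange (4 * (c : Int) + 1) (4 * ((c + 1 : Nat) : Int) + 1) 1
        = [4 * (c : Int) + 1, 4 * (c : Int) + 2, 4 * (c : Int) + 3, 4 * (c : Int) + 4] := by
      push_cast
      rw [PySem.List.pyRange_one_cons (by omega), PySem.List.pyRange_one_cons (by omega),
          PySem.List.pyRange_one_cons (by omega), PySem.List.pyRange_one_cons (by omega),
          PySem.List.pyRange_one_eq_nil (by omega)]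
      simp only [List.cons.injEq, and_true]
      exact ⟨trivial, by omega, by omega, by omega⟩
    have hrange : PySem.List.pyRange 0 ((c + 1 : Nat) : Int) 1
        = PySem.List.pyRange 0 (c : Int) 1 ++ [(c : Int)] := by
      push_cast
      exact PySem.List.pyRange_one_succ_right (by omega)
    rw [hsplit, htail, List.map_append, ih, hrange]
    simp only [List.map_cons, List.map_nil, List.map_append]
    rw [if_neg (by omega : ¬ (4 * (c : Int) + 1) % 4 = 0),
        if_neg (by omega : ¬ (4 * (c : Int) + 1) % 4 = 2),
        if_neg (by omega : ¬ (4 * (c : Int) + 2) % 4 = 0),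
        if_pos (by omega : (4 * (c : Int) + 2) % 4 = 2),
        if_neg (by omega : ¬ (4 * (c : Int) + 3) % 4 = 0),
        if_neg (by omega : ¬ (4 * (c : Int) + 3) % 4 = 2),
        if_pos (by omega : (4 * (c : Int) + 4) % 4 = 0)]
    have hdiv : (4 * (c : Int) + 2) / 4 = (c : Int) := by omega
    rw [hdiv]
    simp

-- the odd/even alternation of B's line indices 1 .. 2*b, paired up per board row
lemma pv_pairs (L D M : Int → List Char) :
    ∀ (n : Nat) (a b : Int), b - a = n →
    (∀ r, a ≤ r → r < b → L (2 * r + 1) = D r ∧ L (2 * r + 2) = M r) →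
    (PySem.List.pyRange (2 * a + 1) (2 * b + 1) 1).map L
      = (PySem.List.pyRange a b 1).flatMap (fun r => [D r, M r]) := by
  intro n
  induction n with
  | zero =>
    intro a b h1 _
    rw [PySem.List.pyRange_one_eq_nil (by omega), PySem.List.pyRange_one_eq_nil (by omega)]
    simp
  | succ k ih =>
    intro a b h1 h2
    rw [PySem.List.pyRange_one_cons (by omega : 2 * a + 1 < 2 * b + 1),
        PySem.List.pyRange_one_cons (by omega : 2 * a + 1 + 1 < 2 * b + 1),
        PySem.List.pyRange_one_cons (by omega : a < b)]
    have hstep : PySem.List.pyRange (2 * a + 1 + 1 + 1) (2 * b + 1) 1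
        = PySem.List.pyRange (2 * (a + 1) + 1) (2 * b + 1) 1 := by
      have h3 : 2 * a + 1 + 1 + 1 = 2 * (a + 1) + 1 := by omega
      rw [h3]
    rw [hstep]
    have ihv := ih (a + 1) b (by omega) (fun r hr1 hr2 => h2 r (by omega) hr2)
    simp only [List.map_cons, List.flatMap_cons, ihv]
    obtain ⟨hD, hM⟩ := h2 a (by omega) (by omega)
    rw [show 2 * a + 1 + 1 = 2 * a + 2 by ring, hD, hM]
    simp

-- ===== VERDICT (by name: the statement is the Claim_ definition above) =====
theorem position_string_spec : Claim_equal_position_string := by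
  intro pos _ hpre
  unfold Spec_position_string
  unfold Pre_position_string at hpre
  simp only [position_string, position_string_alt, List.getD_eq_getElem?_getD] at hpre ⊢
  by_cases hR : (PySem.Chars.splitOn pos.toList ['_'])[0]?.getD [] = ['R']
  · have hpre' := hpre hR
    obtain ⟨h5, hsr, hsc, hnum⟩ := hpre'
    simp only [hR, if_pos, ne_eq, not_true_eq_false, if_false]
    rw [if_pos h5, if_pos h5]
    obtain ⟨rows, hr⟩ := Option.isSome_iff_exists.mp hsr
    obtain ⟨cols, hc⟩ := Option.isSome_iff_exists.mp hsc
    rw [hr, hc] at hnum ⊢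
    simp only [Option.getD_some] at hnum
    obtain ⟨hrows0, hcols1, hlen⟩ := hnum
    simp only []
    congr 1
    congr 1
    -- names
    set board := PySem.Chars.replace ((PySem.Chars.splitOn pos.toList ['_'])[4]?.getD []) ['-'] [' '] with hboard
    -- PySem.mod/floordiv on positive literal divisors are % and /
    have hm2 : ∀ a : Int, PySem.Int.mod a 2 = a % 2 := fun a => PySem.Int.mod_eq_emod_of_pos (by norm_num)
    have hm4 : ∀ a : Int, PySem.Int.mod a 4 = a % 4 := fun a => PySem.Int.mod_eq_emod_of_pos (by norm_num)
    have hd2 : ∀ a : Int, PySem.Int.floordiv a 2 = a / 2 := fun a => PySem.Int.floordiv_eq_ediv_of_pos (by norm_num)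
    have hd4 : ∀ a : Int, PySem.Int.floordiv a 4 = a / 4 := fun a => PySem.Int.floordiv_eq_ediv_of_pos (by norm_num)
    have hC : ((cols.toNat : Int)) = cols := by omega
    have hC1 : (cols - 1).toNat = cols.toNat - 1 := by omega
    -- B's line 0 is A's top border
    have hline0 : (PySem.List.pyRange 0 (4 * cols + 1) 1).map (pvGlyph rows cols board 0)
        = '┌' :: ((List.replicate (cols.toNat - 1) ['─','─','─','┬']).flatten ++ ['─','─','─','┐']) := by
      have hb := pv_border_line cols '┌' '┬' '┐' cols.toNat (by omega) (by omega)
      rw [hC] at hb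
      rw [if_pos rfl] at hb
      rw [← hb]
      apply List.map_congr_left
      intro j _
      simp only [pvGlyph, hm2, hm4]
      rw [if_pos (show (0:Int) % 2 = 0 by norm_num)]
      simp
    -- B's odd lines are A's cell rows
    have hlineodd : ∀ r : Int, (PySem.List.pyRange 0 (4 * cols + 1) 1).map (pvGlyph rows cols board (2 * r + 1))
        = '│' :: ((PySem.List.pyRange 0 cols 1).map
            (fun cc => [' ', PySem.List.pyGetD board (r * cols + cc) ' ', ' ', '│'])).flatten := by
      intro r
      have hb := pv_data_line board (r * cols) cols.toNat
      rw [hC] at hb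
      rw [← hb]
      apply List.map_congr_left
      intro j _
      simp only [pvGlyph, hm2, hm4, hd2, hd4]
      rw [if_neg (show ¬((2 * r + 1) % 2 = 0) by omega),
          show (2 * r + 1 - 1) / 2 = r by omega]
    -- B's inner even lines are A's middle border
    have hlinemid : ∀ r : Int, 0 ≤ r → r < rows - 1 →
        (PySem.List.pyRange 0 (4 * cols + 1) 1).map (pvGlyph rows cols board (2 * r + 2))
        = '├' :: ((List.replicate (cols.toNat - 1) ['─','─','─','┼']).flatten ++ ['─','─','─','┤']) := by
      intro r hr0 hrlt
      have hb := pv_border_line cols '├' '┼' '┤' cols.toNat (by omega) (by omega)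
      rw [hC] at hb
      rw [if_pos rfl] at hb
      rw [← hb]
      apply List.map_congr_left
      intro j _
      simp only [pvGlyph, hm2, hm4]
      rw [if_pos (show (2 * r + 2) % 2 = 0 by omega),
          if_neg (show ¬(2 * r + 2 = 0) by omega),
          if_neg (show ¬(2 * r + 2 = 2 * rows) by omega),
          if_neg (show ¬(2 * r + 2 = 0) by omega),
          if_neg (show ¬(2 * r + 2 = 2 * rows) by omega),
          if_neg (show ¬(2 * r + 2 = 0) by omega),
          if_neg (show ¬(2 * r + 2 = 2 * rows) by omega)]
    -- B's last line is A's bottom border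
    have hlinebot : 1 ≤ rows →
        (PySem.List.pyRange 0 (4 * cols + 1) 1).map (pvGlyph rows cols board (2 * rows))
        = '└' :: ((List.replicate (cols.toNat - 1) ['─','─','─','┴']).flatten ++ ['─','─','─','┘']) := by
      intro hr1
      have hb := pv_border_line cols '└' '┴' '┘' cols.toNat (by omega) (by omega)
      rw [hC] at hb
      rw [if_pos rfl] at hb
      rw [← hb]
      apply List.map_congr_left
      intro j _
      simp only [pvGlyph, hm2, hm4]
      rw [if_pos (show (2 * rows) % 2 = 0 by omega),
          if_neg (show ¬(2 * rows = 0) by omega),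
          if_neg (show ¬(2 * rows = 0) by omega),
          if_neg (show ¬(2 * rows = 0) by omega)]
      simp
    -- reduce A's loops to a flatMap over the rows
    simp only [pv_ite_append, pv_ite_cons, PySem.List.foldl_append_eq_flatMap,
      List.append_assoc, List.cons_append, List.nil_append]
    by_cases hrows : 0 < rows
    · -- B's line list, paired up
      have hcons : PySem.List.pyRange 0 (2 * rows + 1) 1 = 0 :: PySem.List.pyRange (2 * 0 + 1) (2 * rows + 1) 1 := by
        rw [PySem.List.pyRange_one_cons (by omega)]
        norm_num
      rw [hcons, List.map_cons]
      rw [pv_pairs (fun i => (PySem.List.pyRange 0 (4 * cols + 1) 1).map (pvGlyph rows cols board i))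
            (fun r => '│' :: ((PySem.List.pyRange 0 cols 1).map
              (fun cc => [' ', PySem.List.pyGetD board (r * cols + cc) ' ', ' ', '│'])).flatten)
            (fun r => if r < rows - 1
              then '├' :: ((List.replicate (cols.toNat - 1) ['─','─','─','┼']).flatten ++ ['─','─','─','┤'])
              else '└' :: ((List.replicate (cols.toNat - 1) ['─','─','─','┴']).flatten ++ ['─','─','─','┘']))
            rows.toNat 0 rows (by omega) ?_]
      · rw [hline0, pv_join_newline]
        rw [List.flatMap_cons, List.flatMap_assoc]
        unfold pvRepeatA
        rw [hC1]
        simp only [List.flatMap_cons, List.flatMap_nil, List.append_nil, ← List.flatMap_def,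
          ← pv_ite_append_right, List.append_assoc, List.cons_append, List.nil_append]
      · intro r hr0 hrlt
        dsimp only
        refine ⟨hlineodd r, ?_⟩
        by_cases hmid : r < rows - 1
        · rw [if_pos hmid]
          exact hlinemid r hr0 hmid
        · rw [if_neg hmid]
          rw [show 2 * r + 2 = 2 * rows by omega]
          exact hlinebot (by omega)
    · -- rows = 0: only the top border line
      have hrows0' : rows = 0 := by omega
      subst hrows0'
      have h01 : PySem.List.pyRange (0:Int) (2 * 0 + 1) 1 = [0] := by decide
      have hnil : PySem.List.pyRange (0:Int) 0 1 = [] := by decide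
      rw [h01, hnil, List.map_cons, List.map_nil, hline0, PySem.Chars.join_singleton]
      unfold pvRepeatA
      rw [hC1]
      simp
  · simp only [hR, if_false, ne_eq, not_false_eq_true, if_true]
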